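-- pv_equiv track=rewrite | github.com/PrefLib/preflibtools | tests/properties/subdomains/dichotomous/test_interval.py | generate_NOT_VI_VEI_instances_T1
-- ===== SOURCE A (Python) =====
-- def generate_NOT_VI_VEI_instances_T1(a):
--     # Generate 'v' voters
--     instance = [[] for _ in range(a)]
--
--     # Generate 'a' alternatives
--     alternatives = [i+1 for i in range(a)]
--
--     # Add two alternatives around the diagonal to votes
--     for i in range(a-1):
--         instance[i].append(alternatives[i])
--         instance[i+1].append(alternatives[i])
--
--     # Add last alternative to first vote
--     instance[0].append(alternatives[-1])
--
--     # Add last alternatiev to last vote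
--     instance[-1].append(alternatives[-1])
--
--     return instance
-- ===== SOURCE B (Python) =====
-- def generate_NOT_VI_VEI_instances_T1(a):
--     # Closed-form block construction: first row [1, a], middle rows [i, i+1],
--     # last row [a-1, a]; the single-voter case a == 1 collapses to [[a, a]].
--     if a == 1:
--         return [[a, a]]
--     first = [1, a]
--     middle = [[i, i + 1] for i in range(1, a - 1)]
--     last = [a - 1, a]
--     return [first] + middle + [last]
-- ===== Notes on version B (the rewrite author's own statement) =====
-- stated objective: alternative
-- what changed: Replaced A's edge loop that mutates two rows per iteration plus two trailing appends with a closed-form block construction concatenating the first row [1,a], the middle rows [[i,i+1] for i in 1..a-2] and the last row [a-1,a], with the a==1 case collapsing to [[a,a]].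
-- outside the precondition, e.g. on generate_NOT_VI_VEI_instances_T1(0): A raises IndexError, B returns [[1, 0], [-1, 0]]
import Mathlib
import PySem

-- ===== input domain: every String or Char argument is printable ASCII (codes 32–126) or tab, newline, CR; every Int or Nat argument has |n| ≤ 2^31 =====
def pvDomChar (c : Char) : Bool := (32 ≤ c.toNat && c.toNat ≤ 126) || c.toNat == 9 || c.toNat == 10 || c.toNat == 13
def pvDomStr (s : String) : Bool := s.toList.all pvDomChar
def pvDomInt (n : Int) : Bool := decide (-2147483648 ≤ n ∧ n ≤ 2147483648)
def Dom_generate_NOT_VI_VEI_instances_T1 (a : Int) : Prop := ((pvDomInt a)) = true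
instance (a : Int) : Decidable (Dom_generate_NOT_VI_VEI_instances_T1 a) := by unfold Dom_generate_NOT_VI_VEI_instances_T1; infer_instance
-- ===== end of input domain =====

-- B replaces A's edge loop (mutating two rows per step, plus two trailing appends) with a
-- closed-form block construction [first] + middle + [last]; objective 'alternative', same cost.
-- Both programs mutate only lists they themselves create; no argument is mutated.

-- ===== PORT A =====
-- Literal transliteration of A: list mutation instance[i].append(v) is List.modify i (· ++ [v]).
def generate_NOT_VI_VEI_instances_T1 (a : Int) : List (List Int) :=
  let instance0 : List (List Int) := (List.range a.toNat).map (fun (_ : Nat) => ([] : List Int))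
  let alternatives : List Int := (List.range a.toNat).map (fun (i : Nat) => (i : Int) + 1)
  let inst1 :=
    (List.range (a - 1).toNat).foldl
      (fun (inst : List (List Int)) (i : Nat) =>
        -- alternatives[i]: always in range for the loop's indices
        let v := PySem.List.pyGetD alternatives (i : Int) 0
        (inst.modify i (fun r => r ++ [v])).modify (i + 1) (fun r => r ++ [v]))
      instance0
  -- alternatives[-1] raises IndexError when a ≤ 0: that case is excluded by Pre_
  let last := PySem.List.pyGetD alternatives (-1) 0
  let inst2 := inst1.modify 0 (fun r => r ++ [last])
  let inst3 := inst2.modify (inst2.length - 1) (fun r => r ++ [last])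
  inst3

-- ===== PORT B =====
def generate_NOT_VI_VEI_instances_T1_alt (a : Int) : List (List Int) :=
  if a = 1 then [[a, a]]
  else
    let first : List Int := [1, a]
    let middle : List (List Int) := (PySem.List.pyRange 1 (a - 1) 1).map (fun i => [i, i + 1])
    let last : List Int := [a - 1, a]
    [first] ++ middle ++ [last]

-- ===== PRECONDITION & SPEC =====
-- Pre_ excludes exactly a ≤ 0, where A raises IndexError on alternatives[-1].
def Pre_generate_NOT_VI_VEI_instances_T1 (a : Int) : Prop := 1 ≤ a
instance (a : Int) : Decidable (Pre_generate_NOT_VI_VEI_instances_T1 a) := by unfold Pre_generate_NOT_VI_VEI_instances_T1; infer_instance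
def pvWitness_generate_NOT_VI_VEI_instances_T1 : Int := 4
def Spec_generate_NOT_VI_VEI_instances_T1 (a : Int) (out : List (List Int)) : Prop := out = generate_NOT_VI_VEI_instances_T1_alt a
instance (a : Int) (out : List (List Int)) : Decidable (Spec_generate_NOT_VI_VEI_instances_T1 a out) := by unfold Spec_generate_NOT_VI_VEI_instances_T1; infer_instance

-- ===== CLAIM (what is proved, stated in full; the proofs are below) =====
def Claim_equal_generate_NOT_VI_VEI_instances_T1 : Prop := ∀ (a : Int), Dom_generate_NOT_VI_VEI_instances_T1 a → Pre_generate_NOT_VI_VEI_instances_T1 a → Spec_generate_NOT_VI_VEI_instances_T1 a (generate_NOT_VI_VEI_instances_T1 a)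

-- ===== LEMMAS AND PROOFS =====

-- One step of A's edge loop on the closed-form state: appending k+1 to rows k and k+1
-- turns the k-edge rows into the (k+1)-edge rows.
theorem pv_step (n k : Nat) :
    ((((List.range n).map (fun (i : Nat) =>
        (if 1 ≤ i ∧ i ≤ k then [(i : Int)] else []) ++ (if i + 1 ≤ k then [(i : Int) + 1] else []))).modify k
        (fun r => r ++ [(k : Int) + 1])).modify (k + 1) (fun r => r ++ [(k : Int) + 1]))
    = (List.range n).map (fun (i : Nat) =>
        (if 1 ≤ i ∧ i ≤ k + 1 then [(i : Int)] else []) ++ (if i + 1 ≤ k + 1 then [(i : Int) + 1] else [])) := by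
  apply List.ext_getElem
  · simp
  · intro j h1 h2
    have hjn : j < n := by simpa using h2
    simp only [List.getElem_modify, List.getElem_map, List.getElem_range]
    rcases Nat.lt_trichotomy j k with hj | hj | hj
    · rw [if_neg (by omega : ¬ (k + 1 = j)), if_neg (by omega : ¬ (k = j))]
      congr 1 <;> · split_ifs <;> first | rfl | omega
    · rw [if_neg (by omega : ¬ (k + 1 = j)), if_pos (by omega : k = j)]
      rw [if_neg (by omega : ¬ (j + 1 ≤ k)), if_pos (by omega : j + 1 ≤ k + 1)]
      by_cases h1j : 1 ≤ j
      · rw [if_pos (by omega : 1 ≤ j ∧ j ≤ k), if_pos (by omega : 1 ≤ j ∧ j ≤ k + 1)]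
        simp [hj]
      · rw [if_neg (by omega : ¬ (1 ≤ j ∧ j ≤ k)), if_neg (by omega : ¬ (1 ≤ j ∧ j ≤ k + 1))]
        simp [hj]
    · rcases Nat.eq_or_lt_of_le hj with hj3 | hj3
      · rw [if_pos hj3, if_neg (by omega : ¬ (k = j))]
        rw [if_neg (by omega : ¬ (1 ≤ j ∧ j ≤ k)), if_neg (by omega : ¬ (j + 1 ≤ k))]
        rw [if_pos (by omega : 1 ≤ j ∧ j ≤ k + 1), if_neg (by omega : ¬ (j + 1 ≤ k + 1))]
        simp
        omega
      · rw [if_neg (by omega : ¬ (k + 1 = j)), if_neg (by omega : ¬ (k = j))]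
        congr 1 <;> · split_ifs <;> first | rfl | omega

-- Loop invariant for A's edge loop: after k edges, row i holds [i] iff 1 ≤ i ≤ k and [i+1] iff i+1 ≤ k.
theorem loopA_invariant (n k : Nat) (hk : k ≤ n - 1) :
    (List.range k).foldl
      (fun (inst : List (List Int)) (i : Nat) =>
        let v := PySem.List.pyGetD ((List.range n).map (fun (j : Nat) => (j : Int) + 1)) (i : Int) 0
        (inst.modify i (fun r => r ++ [v])).modify (i + 1) (fun r => r ++ [v]))
      ((List.range n).map (fun (_ : Nat) => ([] : List Int)))
    = (List.range n).map (fun (i : Nat) =>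
        (if 1 ≤ i ∧ i ≤ k then [(i : Int)] else []) ++ (if i + 1 ≤ k then [(i : Int) + 1] else [])) := by
  induction k with
  | zero =>
    rw [show List.range 0 = ([] : List Nat) from rfl, List.foldl_nil]
    apply List.map_congr_left
    intro i hi
    rw [if_neg (by omega), if_neg (by omega)]
    rfl
  | succ k ih =>
    rw [List.range_succ, List.foldl_append, ih (by omega)]
    simp only [List.foldl_cons, List.foldl_nil]
    have hv : PySem.List.pyGetD ((List.range n).map (fun (j : Nat) => (j : Int) + 1)) ((k : Nat) : Int) 0
        = (k : Int) + 1 := by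
      rw [PySem.List.pyGetD_natCast]
      have hkn : k < n := by omega
      rw [List.getD_eq_getElem _ _ (by simpa using hkn)]
      simp
    rw [hv]
    exact pv_step n k

-- alternatives[-1] = a  when 1 ≤ a.
theorem alt_last (a : Int) (ha : 1 ≤ a) :
    PySem.List.pyGetD ((List.range a.toNat).map (fun (i : Nat) => (i : Int) + 1)) (-1) 0 = a := by
  have hne : ((List.range a.toNat).map (fun (i : Nat) => (i : Int) + 1)) ≠ [] := by
    simp [List.map_eq_nil_iff, List.range_eq_nil]
    omega
  rw [PySem.List.pyGetD_neg_one _ _ hne, List.getLast_eq_getElem]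
  simp only [List.getElem_map, List.getElem_range, List.length_map, List.length_range]
  omega

-- ===== VERDICT (by name: the statement is the Claim_ definition above) =====
theorem generate_NOT_VI_VEI_instances_T1_spec : Claim_equal_generate_NOT_VI_VEI_instances_T1 := by
  intro a _ ha
  unfold Spec_generate_NOT_VI_VEI_instances_T1
  unfold Pre_generate_NOT_VI_VEI_instances_T1 at ha
  unfold generate_NOT_VI_VEI_instances_T1 generate_NOT_VI_VEI_instances_T1_alt
  dsimp only
  rw [loopA_invariant a.toNat (a - 1).toNat (by omega), alt_last a ha]
  by_cases h1 : a = 1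
  · subst h1; decide
  · rw [if_neg h1]
    have ha2 : 2 ≤ a := by omega
    rw [PySem.List.pyRange_one]
    set n := a.toNat with hn
    have hn2 : 2 ≤ n := by omega
    have hm : (a - 1 - 1).toNat = n - 2 := by omega
    have hk : (a - 1).toNat = n - 1 := by omega
    rw [hm, hk]
    apply List.ext_getElem
    · simp; omega
    · intro j hL hR
      have hjn : j < n := by simpa using hL
      simp only [List.getElem_modify, List.length_modify, List.length_map, List.length_range]
      rcases Nat.eq_or_lt_of_le (Nat.zero_le j) with hj0 | hj0
      · -- j = 0 : row [1, a]
        rw [if_neg (by omega : ¬ (n - 1 = j)), if_pos (by omega : 0 = j)]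
        simp only [List.getElem_map, List.getElem_range]
        rw [if_neg (by omega : ¬ (1 ≤ j ∧ j ≤ n - 1)), if_pos (by omega : j + 1 ≤ n - 1)]
        have : j = 0 := by omega
        subst this
        simp
      · rcases Nat.lt_or_ge j (n - 1) with hjm | hjm
        · -- middle row [j, j+1]
          rw [if_neg (by omega : ¬ (n - 1 = j)), if_neg (by omega : ¬ (0 = j))]
          simp only [List.getElem_map, List.getElem_range]
          rw [if_pos (by omega : 1 ≤ j ∧ j ≤ n - 1), if_pos (by omega : j + 1 ≤ n - 1)]
          rw [List.getElem_append_left (by simp; omega),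
              List.getElem_append_right (by simp; omega)]
          simp only [List.length_cons, List.length_nil, List.getElem_map, List.getElem_range]
          have hc : (1 : Int) + ((j - (0 + 1) : Nat) : Int) = (j : Int) := by omega
          rw [List.singleton_append, ← hc]
        · -- last row [n-1, a]
          rw [if_pos (by omega : n - 1 = j), if_neg (by omega : ¬ (0 = j))]
          simp only [List.getElem_map, List.getElem_range]
          rw [if_pos (by omega : 1 ≤ j ∧ j ≤ n - 1), if_neg (by omega : ¬ (j + 1 ≤ n - 1))]
          rw [List.getElem_append_right (by simp; omega), List.getElem_singleton]
          simp only [List.append_nil, List.singleton_append]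
          have hc : ((j : Nat) : Int) = a - 1 := by omega
          rw [hc]
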